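-- pv_equiv track=rewrite | github.com/Eaglewatch55/Rock_Paper_Scissors | Rock-Paper-Scissors (Python)/task/game.py | calculate_relations
-- ===== SOURCE A (Python) =====
-- def calculate_relations(choice, options: list):
--     compensate = lambda c: c - (0 if c < len(options) else len(options))
--     wins = []
--     loses = []
--     options.pop(choice)
--
--     for i in range(len(options)):
--         index = i + choice
--
--         if i < len(options) / 2:
--             wins.append(options[compensate(index)])
--         else:
--             loses.append(options[compensate(index)])
--
--     return wins, loses
-- ===== SOURCE B (Python) =====
-- def calculate_relations(choice, options: list):
--     options.pop(choice)
--     rotated = options[choice:] + options[:choice]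
--     k = (len(options) + 1) // 2
--     return rotated[:k], rotated[k:]
-- ===== Notes on version B (the rewrite author's own statement) =====
-- stated objective: simpler
-- what changed: Replaces the index loop with its compensate wraparound lambda and two append branches by a two-slice rotation of the popped list and a single split at the ceil midpoint (C-level slicing instead of a per-element Python loop).
-- crash fix: For options of length n >= 2 and choice = -n, A raises IndexError inside its loop (compensate never maps the doubly-negative index back into range) while B returns the rotation split of the remaining list. — e.g. on calculate_relations(-2, ["a", "b"]): A raises IndexError, B returns (["b"], [])
import Mathlib
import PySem

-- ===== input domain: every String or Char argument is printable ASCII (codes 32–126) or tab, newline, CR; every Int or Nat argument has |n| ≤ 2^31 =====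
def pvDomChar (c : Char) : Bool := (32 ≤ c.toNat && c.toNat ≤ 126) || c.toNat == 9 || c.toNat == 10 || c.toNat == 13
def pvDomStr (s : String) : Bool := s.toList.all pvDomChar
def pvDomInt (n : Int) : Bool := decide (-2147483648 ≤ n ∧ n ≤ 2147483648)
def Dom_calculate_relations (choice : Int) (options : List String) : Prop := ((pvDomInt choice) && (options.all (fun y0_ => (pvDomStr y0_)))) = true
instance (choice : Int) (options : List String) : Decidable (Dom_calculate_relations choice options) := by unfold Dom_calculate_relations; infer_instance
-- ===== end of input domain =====

-- B replaces A's compensate-indexed loop by a pop, a two-slice rotation and one split at the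
-- ceil midpoint (simpler decomposition, same O(n) cost); both mutate `options` by the same pop,
-- the equivalence proved here is about the return value.


-- ===== PORT A =====
def calculate_relations (choice : Int) (options : List String) : List String × List String :=
  match PySem.List.pop? options choice with
  | none => ([], [])  -- IndexError from pop; excluded by Pre_
  | some (_, opts) =>
    -- `i < len(options) / 2` (Python true division) is exact as `2 * i < len` on ints
    let compensate : Int → Int := fun c => c - (if c < (opts.length : Int) then 0 else (opts.length : Int))
    (PySem.List.pyRange 0 (opts.length : Int) 1).foldl
      (fun st i =>
        match PySem.List.pyGet? opts (compensate (i + choice)) with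
        | none => st  -- IndexError; excluded by Pre_
        | some v =>
          if 2 * i < (opts.length : Int) then (st.1 ++ [v], st.2) else (st.1, st.2 ++ [v]))
      ([], [])

-- ===== PORT B =====
def calculate_relations_alt (choice : Int) (options : List String) : List String × List String :=
  match PySem.List.pop? options choice with
  | none => ([], [])  -- IndexError from pop; excluded by Pre_
  | some (_, opts) =>
    let rotated := PySem.List.slice opts (some choice) none ++ PySem.List.slice opts none (some choice)
    let k := PySem.Int.floordiv ((opts.length : Int) + 1) 2
    (PySem.List.slice rotated none (some k), PySem.List.slice rotated (some k) none)

-- ===== PRECONDITION & SPEC =====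
-- Pre_ excludes exactly the inputs where the Python A raises IndexError: an empty list or a
-- choice outside pop's range, and choice = -len(options) with len ≥ 2 (the loop then indexes
-- options[choice] with a doubly-negative index).
def Pre_calculate_relations (choice : Int) (options : List String) : Prop :=
  options ≠ [] ∧ -(options.length : Int) ≤ choice ∧ choice < (options.length : Int) ∧
    (choice = -(options.length : Int) → options.length = 1)
instance (choice : Int) (options : List String) : Decidable (Pre_calculate_relations choice options) := by unfold Pre_calculate_relations; infer_instance
def pvWitness_calculate_relations : Int × List String := (0, ["rock", "paper", "scissors"])

-- For options of length n ≥ 2 and choice = -n, A raises IndexError inside its loop while B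
-- returns the rotation split of the remaining list.
def Raises_calculate_relations (choice : Int) (options : List String) : Prop :=
  2 ≤ options.length ∧ choice = -(options.length : Int)
instance (choice : Int) (options : List String) : Decidable (Raises_calculate_relations choice options) := by unfold Raises_calculate_relations; infer_instance
def pvRaiseWitness_calculate_relations : Int × List String := (-2, ["a", "b"])
def pvRaiseWitnessOut_calculate_relations : List String × List String := (["b"], [])

def Spec_calculate_relations (choice : Int) (options : List String) (out : List String × List String) : Prop := out = calculate_relations_alt choice options
instance (choice : Int) (options : List String) (out : List String × List String) : Decidable (Spec_calculate_relations choice options out) := by unfold Spec_calculate_relations; infer_instance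

-- ===== CLAIM (what is proved, stated in full; the proofs are below) =====
def Claim_equal_calculate_relations : Prop := ∀ (choice : Int) (options : List String), Dom_calculate_relations choice options → Pre_calculate_relations choice options → Spec_calculate_relations choice options (calculate_relations choice options)
def Claim_raises_calculate_relations : Prop := (∀ (choice : Int) (options : List String), Dom_calculate_relations choice options → Raises_calculate_relations choice options → ¬ Pre_calculate_relations choice options) ∧ (Dom_calculate_relations (pvRaiseWitness_calculate_relations.1) (pvRaiseWitness_calculate_relations.2) ∧ Raises_calculate_relations (pvRaiseWitness_calculate_relations.1) (pvRaiseWitness_calculate_relations.2) ∧ calculate_relations_alt (pvRaiseWitness_calculate_relations.1) (pvRaiseWitness_calculate_relations.2) = pvRaiseWitnessOut_calculate_relations)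

-- ===== LEMMAS AND PROOFS =====

lemma getRot (opts : List String) (choice i : Int)
    (hlo : -(opts.length:Int) ≤ choice) (hhi : choice ≤ (opts.length:Int))
    (h0 : 0 ≤ i) (hi : i < (opts.length:Int)) :
    PySem.List.pyGet? opts (i + choice - (if i + choice < (opts.length:Int) then 0 else (opts.length:Int)))
      = some ((opts.drop (PySem.List.clampIdx opts.length choice) ++ opts.take (PySem.List.clampIdx opts.length choice)).getD i.toNat "") := by
  obtain ⟨c, hcdef, hcle, hcv⟩ :
      ∃ c : Nat, PySem.List.clampIdx opts.length choice = c ∧ c ≤ opts.length ∧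
        ((c:Int) = choice ∨ (c:Int) = (opts.length:Int) + choice) := by
    refine ⟨PySem.List.clampIdx opts.length choice, rfl, ?_, ?_⟩ <;>
      simp only [PySem.List.clampIdx] <;> split_ifs <;> omega
  rw [hcdef]
  have hdl : (opts.drop c).length = opts.length - c := List.length_drop
  have htl : (opts.take c).length = c := by rw [List.length_take]; omega
  have hjR : i.toNat < (opts.drop c ++ opts.take c).length := by
    simp only [List.length_append, hdl, htl]; omega
  rw [List.getD_eq_getElem _ _ hjR]
  simp only [PySem.List.pyGet?, PySem.List.pyIdx?, List.getElem_append, hdl,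
    List.getElem_drop, List.getElem_take]
  rcases hcv with hcv | hcv <;> split_ifs <;> simp only [Option.bind] <;>
    first
    | (rw [List.getElem?_eq_getElem (by omega)]
       exact congrArg some (by congr 1; omega))
    | omega

lemma splitFold (l : List Int) (p : Int → Prop) [DecidablePred p] (f : Int → String)
    (w ls : List String) :
    l.foldl (fun st i => if p i then (st.1 ++ [f i], st.2) else (st.1, st.2 ++ [f i])) (w, ls)
      = (w ++ (l.filter (fun i => decide (p i))).map f,
         ls ++ (l.filter (fun i => !decide (p i))).map f) := by
  induction l generalizing w ls with
  | nil => simp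
  | cons x t ih =>
    by_cases hx : p x <;> simp [hx, ih]

lemma mapRange (R : List String) (a b : Nat) (hb : b ≤ R.length) (ha : a ≤ b) :
    (PySem.List.pyRange (a:Int) (b:Int) 1).map (fun i => R.getD i.toNat "") = (R.take b).drop a := by
  apply List.ext_getElem
  · simp [PySem.List.length_pyRange_one]; omega
  · intro j h1 h2
    have hj : j < b - a := by simpa [PySem.List.length_pyRange_one] using h1
    rw [List.getElem_map, PySem.List.getElem_pyRange_one, List.getElem_drop, List.getElem_take,
      List.getD_eq_getElem _ _ (by omega)]
    congr 1

lemma core (options : List String) (choice : Int) (v : String) (opts : List String)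
    (hp : PySem.List.pop? options choice = some (v, opts))
    (hlo : -(opts.length : Int) ≤ choice) (hhi : choice ≤ (opts.length : Int)) :
    calculate_relations choice options = calculate_relations_alt choice options := by
  unfold calculate_relations calculate_relations_alt
  rw [hp]
  dsimp only
  have hsl1 : PySem.List.slice opts (some choice) none = opts.drop (PySem.List.clampIdx opts.length choice) :=
    PySem.List.slice_some_none opts choice
  have hsl2 : PySem.List.slice opts none (some choice) = opts.take (PySem.List.clampIdx opts.length choice) := by
    simp [PySem.List.slice]
  set c := PySem.List.clampIdx opts.length choice with hc
  have hcle : c ≤ opts.length := by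
    simp only [hc, PySem.List.clampIdx]; split_ifs <;> omega
  set R := opts.drop c ++ opts.take c with hR
  have hRl : R.length = opts.length := by
    simp only [hR, List.length_append, List.length_drop, List.length_take]; omega
  set kn : Nat := (opts.length + 1) / 2 with hkn
  have hknle : kn ≤ opts.length := by omega
  have hkval : PySem.Int.floordiv ((opts.length : Int) + 1) 2 = (kn : Int) := by
    have := PySem.Int.floordiv_natCast (opts.length + 1) 2
    rw [hkn]
    push_cast at this ⊢
    exact this
  -- right-hand side
  rw [hsl1, hsl2, ← hR, hkval,
    PySem.List.slice_to R (by positivity),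
    PySem.List.slice_from R (by positivity),
    Int.toNat_natCast]
  -- left-hand side: replace the loop body; then split the fold
  refine Eq.trans (PySem.List.foldl_congr_mem _ _
      (fun (st : List String × List String) i =>
        if 2 * i < (opts.length : Int) then (st.1 ++ [R.getD i.toNat ""], st.2)
        else (st.1, st.2 ++ [R.getD i.toNat ""]))
      _ ?_) ?_
  · intro acc x hx
    rw [PySem.List.mem_pyRange_one] at hx
    rw [getRot opts choice x hlo hhi hx.1 hx.2]
  rw [splitFold (PySem.List.pyRange 0 (opts.length : Int) 1)
      (fun i => 2 * i < (opts.length : Int)) (fun i => R.getD i.toNat "") [] []]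
  -- split the range at kn
  rw [PySem.List.pyRange_one_append 0 (kn : Int) (opts.length : Int) (by positivity) (by exact_mod_cast hknle)]
  have hfil1 : (PySem.List.pyRange 0 (kn:Int) 1).filter (fun i => decide (2 * i < (opts.length:Int)))
      = PySem.List.pyRange 0 (kn:Int) 1 := by
    apply List.filter_eq_self.mpr
    intro x hx
    rw [PySem.List.mem_pyRange_one] at hx
    simp only [decide_eq_true_eq]
    omega
  have hfil2 : (PySem.List.pyRange (kn:Int) (opts.length:Int) 1).filter (fun i => decide (2 * i < (opts.length:Int)))
      = [] := by
    apply List.filter_eq_nil_iff.mpr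
    intro x hx
    rw [PySem.List.mem_pyRange_one] at hx
    simp only [decide_eq_true_eq]
    omega
  have hfil3 : (PySem.List.pyRange 0 (kn:Int) 1).filter (fun i => !decide (2 * i < (opts.length:Int)))
      = [] := by
    apply List.filter_eq_nil_iff.mpr
    intro x hx
    rw [PySem.List.mem_pyRange_one] at hx
    simp only [Bool.not_eq_true', decide_eq_false_iff_not]
    omega
  have hfil4 : (PySem.List.pyRange (kn:Int) (opts.length:Int) 1).filter (fun i => !decide (2 * i < (opts.length:Int)))
      = PySem.List.pyRange (kn:Int) (opts.length:Int) 1 := by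
    apply List.filter_eq_self.mpr
    intro x hx
    rw [PySem.List.mem_pyRange_one] at hx
    simp only [Bool.not_eq_true', decide_eq_false_iff_not]
    omega
  rw [List.filter_append, List.filter_append, hfil1, hfil2, hfil3, hfil4,
    List.append_nil, List.nil_append, List.nil_append, List.nil_append]
  have hm1 := mapRange R 0 kn (by omega) (by omega)
  have hm2 := mapRange R kn opts.length (by omega) hknle
  rw [List.take_of_length_le (le_of_eq hRl)] at hm2
  simp only [Nat.cast_zero, List.drop_zero] at hm1
  rw [hm1, hm2]

-- ===== VERDICT (by name: the statement is the Claim_ definition above) =====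
theorem calculate_relations_spec : Claim_equal_calculate_relations := by
  intro choice options _ hpre
  obtain ⟨hne, hlo, hhi, hone⟩ := hpre
  unfold Spec_calculate_relations
  cases hp : PySem.List.pop? options choice with
  | none =>
    unfold calculate_relations calculate_relations_alt
    rw [hp]
  | some pr =>
    obtain ⟨v, opts⟩ := pr
    have hlen : opts.length + 1 = options.length := PySem.List.length_of_pop?_eq_some options hp
    by_cases hE : opts = []
    · subst hE
      unfold calculate_relations calculate_relations_alt
      rw [hp]
      simp [PySem.List.slice, PySem.List.pyRange_one_eq_nil]
    · have hlb : 1 ≤ opts.length := List.length_pos_iff.mpr hE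
      refine (core options choice v opts hp ?_ ?_) <;>
        [skip; omega]
      by_cases hco : choice = -((options.length : Nat) : Int)
      · have := hone hco
        omega
      · omega
@[simp]
theorem calculate_relations_raises : Claim_raises_calculate_relations := by
  unfold Claim_raises_calculate_relations
  constructor
  · intro choice options _ hr hp
    rcases hr with ⟨h2, hc⟩
    rcases hp with ⟨_, _, _, h1⟩
    omega
  · exact ⟨by decide, by decide, by decide⟩
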